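-- pv_equiv track=rewrite | github.com/RicardoTechDev/eas_coelemu | eas_coelemu_app/models.py | formRut
-- ===== SOURCE A (Python) =====
-- def formRut(rut_sin_form):
--     rut = ''
--     dv = ''
--
--     for indice in range(len(rut_sin_form)):
--         if(rut_sin_form[indice]=="-"):
--             if rut_sin_form[indice+1] == 'k' or rut_sin_form[indice+1] == 'K':
--                 dv = rut_sin_form[indice+1].upper()
--                 break
--             dv = rut_sin_form[indice+1]
--             break
--         else:
--             rut += rut_sin_form[indice]
--
--     rut_form ={
--         'rut' : rut,
--         'dv' : dv
--     }
--
--     return rut_form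
-- ===== SOURCE B (Python) =====
-- def formRut(rut_sin_form):
--     rut, sep, rest = rut_sin_form.partition('-')
--     if sep == '':
--         dv = ''
--     else:
--         c = rest[0]
--         dv = 'K' if c in ('k', 'K') else c
--     return {'rut': rut, 'dv': dv}
-- ===== Notes on version B (the rewrite author's own statement) =====
-- stated objective: simpler
-- what changed: Replaces the index-based character-accumulating loop with a single str.partition('-') that splits the string at the first dash, then computes dv from the first character after it.
-- outside the precondition, e.g. on formRut('-'): A raises IndexError, B raises IndexError
import Mathlib
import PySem

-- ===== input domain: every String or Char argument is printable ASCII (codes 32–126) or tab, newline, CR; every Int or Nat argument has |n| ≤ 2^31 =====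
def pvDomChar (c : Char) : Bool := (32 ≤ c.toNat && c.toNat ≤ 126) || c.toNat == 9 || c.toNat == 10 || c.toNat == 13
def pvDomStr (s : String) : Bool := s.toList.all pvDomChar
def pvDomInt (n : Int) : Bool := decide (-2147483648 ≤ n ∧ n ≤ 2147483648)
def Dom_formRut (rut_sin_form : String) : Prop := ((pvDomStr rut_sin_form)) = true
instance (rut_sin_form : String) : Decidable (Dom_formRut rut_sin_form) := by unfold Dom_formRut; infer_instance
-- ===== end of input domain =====

-- B replaces A's index-based accumulating loop by one partition at the first dash: simpler decomposition, same values.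

-- ===== PORT A =====
-- The for-loop over range(len(s)) reads s[indice] in order, so it is the structural
-- recursion over the character list; s[indice+1] is the head of the remaining list
-- (Python raises IndexError when it is absent — excluded by Pre_; ' ' is a dummy there).
def formRutLoopA : List Char → List Char → String × String
  | [], rut => (String.mk rut, "")
  | c :: rest, rut =>
    if c = '-' then
      let nxt := rest.getD 0 ' '       -- rut_sin_form[indice+1]; IndexError when rest = [] (outside Pre_)
      if nxt = 'k' ∨ nxt = 'K' then (String.mk rut, "K")   -- .upper() of 'k'/'K' is 'K'
      else (String.mk rut, String.mk [nxt])
    else formRutLoopA rest (rut ++ [c])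

def formRut (rut_sin_form : String) : List (String × String) :=
  let (rut, dv) := formRutLoopA rut_sin_form.toList []
  [("rut", rut), ("dv", dv)]

-- ===== PORT B =====
-- str.partition('-'): part before the first '-', and (some rest) iff a '-' occurs.
def formRutPartition : List Char → List Char × Option (List Char)
  | [] => ([], none)
  | c :: rest =>
    if c = '-' then ([], some rest)
    else
      let (before, after) := formRutPartition rest
      (c :: before, after)

def formRut_alt (rut_sin_form : String) : List (String × String) :=
  match formRutPartition rut_sin_form.toList with
  | (before, none) => [("rut", String.mk before), ("dv", "")]
  | (before, some rest) =>
    let c := rest.getD 0 ' '           -- rest[0]; IndexError when rest = [] (outside Pre_)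
    [("rut", String.mk before), ("dv", if c = 'k' ∨ c = 'K' then "K" else String.mk [c])]

-- ===== PRECONDITION & SPEC =====
-- Pre_ excludes exactly the strings whose FIRST '-' is the last character: there
-- Python A raises IndexError on s[indice+1] (and Python B on rest[0]).
def Pre_formRut (rut_sin_form : String) : Prop :=
  '-' ∈ rut_sin_form.toList → rut_sin_form.toList.idxOf '-' + 1 < rut_sin_form.toList.length
instance (rut_sin_form : String) : Decidable (Pre_formRut rut_sin_form) := by unfold Pre_formRut; infer_instance

def pvWitness_formRut : String := "12345-9"

def Spec_formRut (rut_sin_form : String) (out : List (String × String)) : Prop := out = formRut_alt rut_sin_form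
instance (rut_sin_form : String) (out : List (String × String)) : Decidable (Spec_formRut rut_sin_form out) := by unfold Spec_formRut; infer_instance

-- ===== CLAIM (what is proved, stated in full; the proofs are below) =====
def Claim_equal_formRut : Prop := ∀ (rut_sin_form : String), Dom_formRut rut_sin_form → Pre_formRut rut_sin_form → Spec_formRut rut_sin_form (formRut rut_sin_form)

-- ===== LEMMAS AND PROOFS =====

theorem formRutLoopA_eq (l : List Char)
    (h : '-' ∈ l → l.idxOf '-' + 1 < l.length) (rut : List Char) :
    formRutLoopA l rut =
      match formRutPartition l with
      | (before, none) => (String.mk (rut ++ before), "")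
      | (before, some rest) =>
        let c := rest.getD 0 ' '
        (String.mk (rut ++ before), if c = 'k' ∨ c = 'K' then "K" else String.mk [c]) := by
  induction l generalizing rut with
  | nil => simp [formRutLoopA, formRutPartition]
  | cons c rest ih =>
    by_cases hc : c = '-'
    · subst hc
      simp [formRutLoopA, formRutPartition]
      split_ifs <;> rfl
    · have h' : '-' ∈ rest → rest.idxOf '-' + 1 < rest.length := by
        intro hm
        have := h (by simp [hm])
        simpa [List.idxOf_cons, hc] using this
      have := ih h' (rut ++ [c])
      simp only [formRutLoopA, formRutPartition, if_neg hc, this]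
      cases hp : formRutPartition rest with
      | mk before after =>
        cases after <;> simp

-- ===== VERDICT (by name: the statement is the Claim_ definition above) =====
theorem formRut_spec : Claim_equal_formRut := by
  intro s _hDom hPre
  unfold Spec_formRut formRut formRut_alt
  have := formRutLoopA_eq s.toList hPre []
  rw [this]
  cases hp : formRutPartition s.toList with
  | mk before after => cases after <;> simp
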